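-- pv_equiv track=rewrite | github.com/prasojojiwandono/logic | smallest_land.py | smallest_land
-- ===== SOURCE A (Python) =====
-- def evaluate_land(grid, row, column, visited):
--     position = f'{row},{column}'
--     if row < 0 or row >= len(grid):
--         return 0
--     if column < 0 or column >= len(grid[0]):
--         return 0
--     if grid[row][column] == 'w':
--         return 0
--     if position in visited:
--         return 0
--     visited.add(position)
--     value = 1 + evaluate_land(grid, row-1,column, visited) + evaluate_land(grid, row+1,column, visited) + evaluate_land(grid, row,column-1, visited) + evaluate_land(grid, row,column+1, visited)
--
--     return value
--
-- def smallest_land(grid):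
--     rows = len(grid)
--     columns = len(grid[0])
--     visited = set()
--     small_land = 10**1000
--     for row in range(rows):
--         for column in range(columns):
--             land_size = evaluate_land(grid, row, column, visited)
--             if land_size <= small_land and land_size > 0:
--                 small_land = land_size
--     if small_land == 10**1000:
--         return 0
--     return small_land
-- ===== SOURCE B (Python) =====
-- def smallest_land(grid):
--     rows = len(grid)
--     columns = len(grid[0])
--     visited = set()
--     small_land = 10**1000
--     for row in range(rows):
--         for column in range(columns):
--             if grid[row][column] == 'w' or f'{row},{column}' in visited:
--                 continue
--             size = 0
--             stack = [(row, column)]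
--             while stack:
--                 i, j = stack.pop()
--                 if i < 0 or i >= rows or j < 0 or j >= columns:
--                     continue
--                 if grid[i][j] == 'w':
--                     continue
--                 key = f'{i},{j}'
--                 if key in visited:
--                     continue
--                 visited.add(key)
--                 size += 1
--                 stack.append((i, j + 1))
--                 stack.append((i, j - 1))
--                 stack.append((i + 1, j))
--                 stack.append((i - 1, j))
--             if 0 < size < small_land:
--                 small_land = size
--     if small_land == 10**1000:
--         return 0
--     return small_land
-- ===== Notes on version B (the rewrite author's own statement) =====
-- stated objective: alternative
-- what changed: Replaces the recursive flood-fill helper with an iterative traversal over an explicit stack and skips water/already-visited cells before starting a region, keeping one shared visited set.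
import Mathlib
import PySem

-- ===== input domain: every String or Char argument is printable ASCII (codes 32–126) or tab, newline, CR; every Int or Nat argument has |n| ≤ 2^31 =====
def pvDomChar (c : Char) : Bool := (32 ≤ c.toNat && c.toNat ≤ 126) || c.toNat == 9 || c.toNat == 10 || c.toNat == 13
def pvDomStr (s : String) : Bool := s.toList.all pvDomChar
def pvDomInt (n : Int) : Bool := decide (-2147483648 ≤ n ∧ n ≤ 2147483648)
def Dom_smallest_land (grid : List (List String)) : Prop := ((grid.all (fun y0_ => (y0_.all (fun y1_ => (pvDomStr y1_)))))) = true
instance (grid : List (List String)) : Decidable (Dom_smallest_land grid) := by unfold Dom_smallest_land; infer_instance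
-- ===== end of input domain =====

-- B replaces the recursive flood fill by an iterative one with an explicit stack and skips
-- already-settled cells up front (objective: alternative; same asymptotic cost, no recursion).

-- ===== PORT A =====

-- f'{row},{column}' (used by both Pythons as the visited-set key)
def pvKey (r c : Int) : String := PySem.Int.toStr r ++ "," ++ PySem.Int.toStr c

-- helpers for the termination measure of the two traversals (proof machinery, not Python code)
def pvCells (grid : List (List String)) : List (Int × Int) :=
  (PySem.List.pyRange 0 grid.length).flatMap
    (fun r => (PySem.List.pyRange 0 grid.headI.length).map (fun c => (r, c)))

def pvCount (grid : List (List String)) (v : PySem.Set String) : Nat :=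
  (pvCells grid).countP (fun p => !(PySem.Set.contains v (pvKey p.1 p.2)))

theorem pv_countP_lt {α : Type} (l : List α) (p q : α → Bool)
    (h : ∀ a ∈ l, q a = true → p a = true) (a : α) (ha : a ∈ l)
    (hp : p a = true) (hq : ¬ q a = true) : l.countP q < l.countP p := by
  obtain ⟨s, t, rfl⟩ := List.append_of_mem ha
  have h1 : s.countP q ≤ s.countP p :=
    List.countP_mono_left (fun x hx => h x (by simp [hx]))
  have h2 : t.countP q ≤ t.countP p :=
    List.countP_mono_left (fun x hx => h x (by simp [hx]))
  simp [List.countP_append, hp, hq]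
  omega

theorem pvCount_le (grid : List (List String)) (v w : PySem.Set String)
    (h : ∀ s, s ∈ v → s ∈ w) : pvCount grid w ≤ pvCount grid v := by
  apply List.countP_mono_left
  intro x _ hx
  simp only [PySem.Set.contains, Bool.not_eq_eq_eq_not, Bool.not_true, List.contains_eq_mem,
    decide_eq_false_iff_not] at hx ⊢
  exact fun hm => hx (h _ hm)

theorem pvCount_lt (grid : List (List String)) (v : PySem.Set String) (r c : Int)
    (hr0 : ¬ r < 0) (hr : ¬ (grid.length : Int) ≤ r)
    (hc0 : ¬ c < 0) (hc : ¬ (grid.headI.length : Int) ≤ c)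
    (hnv : ¬ PySem.Set.contains v (pvKey r c) = true) :
    pvCount grid (PySem.Set.add v (pvKey r c)) < pvCount grid v := by
  have hmono : ∀ a ∈ pvCells grid,
      (!(PySem.Set.contains (PySem.Set.add v (pvKey r c)) (pvKey a.1 a.2))) = true →
      (!(PySem.Set.contains v (pvKey a.1 a.2))) = true := by
    intro a _ ha
    simp only [PySem.Set.contains, List.contains_eq_mem, Bool.not_eq_eq_eq_not, Bool.not_true,
      decide_eq_false_iff_not] at ha ⊢
    exact fun hm => ha ((PySem.Set.mem_add _ _ _).mpr (Or.inl hm))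
  have hmem : (r, c) ∈ pvCells grid :=
    List.mem_flatMap.mpr ⟨r, PySem.List.mem_pyRange_one.mpr (by omega),
      List.mem_map.mpr ⟨c, PySem.List.mem_pyRange_one.mpr (by omega), rfl⟩⟩
  have hp : (!(PySem.Set.contains v (pvKey r c))) = true := by simpa using hnv
  have hq : ¬ (!(PySem.Set.contains (PySem.Set.add v (pvKey r c)) (pvKey r c))) = true := by
    simp only [PySem.Set.contains, List.contains_eq_mem, Bool.not_eq_eq_eq_not, Bool.not_true,
      decide_eq_false_iff_not, not_not]
    exact (PySem.Set.mem_add _ _ _).mpr (Or.inr rfl)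
  exact pv_countP_lt _ _ _ hmono (r, c) hmem hp hq

-- literal port of evaluate_land; the returned visited set carries its "only grows" invariant,
-- needed for termination (the Prop component is proof-only and erased)
def evaluate_land (grid : List (List String)) (row column : Int) (visited : PySem.Set String) :
    Int × { w : PySem.Set String // ∀ s, s ∈ visited → s ∈ w } :=
  let position := pvKey row column
  if h1 : row < 0 ∨ (grid.length : Int) ≤ row then (0, ⟨visited, fun _ h => h⟩)
  else if h2 : column < 0 ∨ (grid.headI.length : Int) ≤ column then (0, ⟨visited, fun _ h => h⟩)
  else if h3 : (PySem.List.pyGetD (PySem.List.pyGetD grid row []) column "" == "w") = true then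
    (0, ⟨visited, fun _ h => h⟩)
  else if h4 : PySem.Set.contains visited position = true then (0, ⟨visited, fun _ h => h⟩)
  else
    let v0 := PySem.Set.add visited position
    let p1 := evaluate_land grid (row - 1) column v0
    let p2 := evaluate_land grid (row + 1) column p1.2.1
    let p3 := evaluate_land grid row (column - 1) p2.2.1
    let p4 := evaluate_land grid row (column + 1) p3.2.1
    (1 + p1.1 + p2.1 + p3.1 + p4.1,
      ⟨p4.2.1, fun s hs =>
        p4.2.2 s (p3.2.2 s (p2.2.2 s (p1.2.2 s ((PySem.Set.mem_add _ _ _).mpr (Or.inl hs)))))⟩)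
termination_by pvCount grid visited
decreasing_by
  · exact pvCount_lt grid visited row column (fun h => h1 (Or.inl h)) (fun h => h1 (Or.inr h)) (fun h => h2 (Or.inl h)) (fun h => h2 (Or.inr h)) h4
  · exact lt_of_le_of_lt (pvCount_le grid _ _ p1.2.2)
      (pvCount_lt grid visited row column (fun h => h1 (Or.inl h)) (fun h => h1 (Or.inr h)) (fun h => h2 (Or.inl h)) (fun h => h2 (Or.inr h)) h4)
  · exact lt_of_le_of_lt (pvCount_le grid _ _ (fun s hs => p2.2.2 s (p1.2.2 s hs)))
      (pvCount_lt grid visited row column (fun h => h1 (Or.inl h)) (fun h => h1 (Or.inr h)) (fun h => h2 (Or.inl h)) (fun h => h2 (Or.inr h)) h4)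
  · exact lt_of_le_of_lt (pvCount_le grid _ _ (fun s hs => p3.2.2 s (p2.2.2 s (p1.2.2 s hs))))
      (pvCount_lt grid visited row column (fun h => h1 (Or.inl h)) (fun h => h1 (Or.inr h)) (fun h => h2 (Or.inl h)) (fun h => h2 (Or.inr h)) h4)

def smallest_land (grid : List (List String)) : Int :=
  let rows : Int := grid.length
  let columns : Int := grid.headI.length
  let res := (PySem.List.pyRange 0 rows 1).foldl (fun st r =>
      (PySem.List.pyRange 0 columns 1).foldl (fun st c =>
        let p := evaluate_land grid r c st.1
        if p.1 ≤ st.2 ∧ 0 < p.1 then (p.2.1, p.1) else (p.2.1, st.2)) st)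
    (PySem.Set.empty, (10 : Int) ^ 1000)
  if res.2 = (10 : Int) ^ 1000 then 0 else res.2

-- ===== PORT B =====

-- the while-loop over the explicit stack; Python pushes right,left,down,up and pops the end,
-- modelled by consing up,down,left,right at the front (head = top of stack)
def flood (grid : List (List String)) (stack : List (Int × Int)) (visited : PySem.Set String)
    (size : Int) : Int × PySem.Set String :=
  match stack with
  | [] => (size, visited)
  | (i, j) :: rest =>
    if h1 : i < 0 ∨ (grid.length : Int) ≤ i ∨ j < 0 ∨ (grid.headI.length : Int) ≤ j then
      flood grid rest visited size
    else if h2 : (PySem.List.pyGetD (PySem.List.pyGetD grid i []) j "" == "w") = true then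
      flood grid rest visited size
    else if h3 : PySem.Set.contains visited (pvKey i j) = true then
      flood grid rest visited size
    else
      flood grid ((i - 1, j) :: (i + 1, j) :: (i, j - 1) :: (i, j + 1) :: rest)
        (PySem.Set.add visited (pvKey i j)) (size + 1)
termination_by (pvCount grid visited, stack.length)
decreasing_by
  · exact Prod.Lex.right _ (by simp)
  · exact Prod.Lex.right _ (by simp)
  · exact Prod.Lex.right _ (by simp)
  · exact Prod.Lex.left _ _ (pvCount_lt grid visited i j (fun h => h1 (Or.inl h)) (fun h => h1 (Or.inr (Or.inl h))) (fun h => h1 (Or.inr (Or.inr (Or.inl h))) ) (fun h => h1 (Or.inr (Or.inr (Or.inr h)))) h3)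

def smallest_land_alt (grid : List (List String)) : Int :=
  let rows : Int := grid.length
  let columns : Int := grid.headI.length
  let res := (PySem.List.pyRange 0 rows 1).foldl (fun st r =>
      (PySem.List.pyRange 0 columns 1).foldl (fun st c =>
        if (PySem.List.pyGetD (PySem.List.pyGetD grid r []) c "" == "w")
            || PySem.Set.contains st.1 (pvKey r c) then st
        else
          let p := flood grid [(r, c)] st.1 0
          if 0 < p.1 ∧ p.1 < st.2 then (p.2, p.1) else (p.2, st.2)) st)
    (PySem.Set.empty, (10 : Int) ^ 1000)
  if res.2 = (10 : Int) ^ 1000 then 0 else res.2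

-- ===== PRECONDITION & SPEC =====
-- Pre_ excludes exactly the inputs on which Python A raises IndexError: the empty grid
-- (grid[0]) and ragged grids with some row shorter than row 0 (grid[row][column] during the scan).
def Pre_smallest_land (grid : List (List String)) : Prop :=
  grid ≠ [] ∧ ∀ r ∈ grid, grid.headI.length ≤ r.length
instance (grid : List (List String)) : Decidable (Pre_smallest_land grid) := by
  unfold Pre_smallest_land; infer_instance

def pvWitness_smallest_land : List (List String) := [["l", "w"], ["w", "l"]]

def Spec_smallest_land (grid : List (List String)) (out : Int) : Prop := out = smallest_land_alt grid
instance (grid : List (List String)) (out : Int) : Decidable (Spec_smallest_land grid out) := by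
  unfold Spec_smallest_land; infer_instance

-- ===== CLAIM (what is proved, stated in full; the proofs are below) =====
def Claim_equal_smallest_land : Prop := ∀ (grid : List (List String)), Dom_smallest_land grid → Pre_smallest_land grid → Spec_smallest_land grid (smallest_land grid)

-- ===== LEMMAS AND PROOFS =====

-- popping one cell from the stack does exactly what one recursive evaluate_land call does
theorem flood_eval (grid : List (List String)) :
    ∀ n : Nat, ∀ v : PySem.Set String, pvCount grid v = n →
    ∀ (i j : Int) (rest : List (Int × Int)) (size : Int),
      flood grid ((i, j) :: rest) v size
        = flood grid rest (evaluate_land grid i j v).2.1 (size + (evaluate_land grid i j v).1) := by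
  intro n
  induction n using Nat.strong_induction_on with
  | _ n ih =>
    intro v hv i j rest size
    rw [flood, evaluate_land]
    by_cases h1 : i < 0 ∨ (grid.length : Int) ≤ i
    · rw [dif_pos (by tauto), dif_pos h1]; simp
    by_cases h2 : j < 0 ∨ (grid.headI.length : Int) ≤ j
    · rw [dif_pos (by tauto), dif_neg h1, dif_pos h2]; simp
    rw [dif_neg (by tauto), dif_neg h1, dif_neg h2]
    by_cases h3 : (PySem.List.pyGetD (PySem.List.pyGetD grid i []) j "" == "w") = true
    · rw [dif_pos h3, dif_pos h3]; simp
    rw [dif_neg h3, dif_neg h3]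
    by_cases h4 : PySem.Set.contains v (pvKey i j) = true
    · rw [dif_pos h4, dif_pos h4]; simp
    rw [dif_neg h4, dif_neg h4]
    have hm0 : pvCount grid (PySem.Set.add v (pvKey i j)) < n := by
      rw [← hv]
      exact pvCount_lt grid v i j (fun h => h1 (Or.inl h)) (fun h => h1 (Or.inr h))
        (fun h => h2 (Or.inl h)) (fun h => h2 (Or.inr h)) h4
    rw [ih _ hm0 _ rfl (i - 1) j _ (size + 1)]
    have hm1 : pvCount grid ((evaluate_land grid (i - 1) j (PySem.Set.add v (pvKey i j))).2 : PySem.Set String) < n :=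
      lt_of_le_of_lt (pvCount_le grid _ _ (evaluate_land grid (i - 1) j (PySem.Set.add v (pvKey i j))).2.2) hm0
    rw [ih _ hm1 _ rfl (i + 1) j _ _]
    have hm2 : pvCount grid ((evaluate_land grid (i + 1) j ((evaluate_land grid (i - 1) j (PySem.Set.add v (pvKey i j))).2 : PySem.Set String)).2 : PySem.Set String) < n :=
      lt_of_le_of_lt (pvCount_le grid _ _ (evaluate_land grid (i + 1) j _).2.2) hm1
    rw [ih _ hm2 _ rfl i (j - 1) _ _]
    have hm3 : pvCount grid ((evaluate_land grid i (j - 1) ((evaluate_land grid (i + 1) j ((evaluate_land grid (i - 1) j (PySem.Set.add v (pvKey i j))).2 : PySem.Set String)).2 : PySem.Set String)).2 : PySem.Set String) < n :=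
      lt_of_le_of_lt (pvCount_le grid _ _ (evaluate_land grid i (j - 1) _).2.2) hm2
    rw [ih _ hm3 _ rfl i (j + 1) rest _]
    simp only [Int.add_assoc]

-- evaluate_land never returns a negative size
theorem eval_nonneg (grid : List (List String)) :
    ∀ n : Nat, ∀ v : PySem.Set String, pvCount grid v = n →
    ∀ i j : Int, 0 ≤ (evaluate_land grid i j v).1 := by
  intro n
  induction n using Nat.strong_induction_on with
  | _ n ih =>
    intro v hv i j
    rw [evaluate_land]
    by_cases h1 : i < 0 ∨ (grid.length : Int) ≤ i
    · rw [dif_pos h1]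
    · by_cases h2 : j < 0 ∨ (grid.headI.length : Int) ≤ j
      · rw [dif_neg h1, dif_pos h2]
      · by_cases h3 : (PySem.List.pyGetD (PySem.List.pyGetD grid i []) j "" == "w") = true
        · rw [dif_neg h1, dif_neg h2, dif_pos h3]
        · by_cases h4 : PySem.Set.contains v (pvKey i j) = true
          · rw [dif_neg h1, dif_neg h2, dif_neg h3, dif_pos h4]
          · rw [dif_neg h1, dif_neg h2, dif_neg h3, dif_neg h4]
            have hm0 : pvCount grid (PySem.Set.add v (pvKey i j)) < n := by
              rw [← hv]
              exact pvCount_lt grid v i j (fun h => h1 (Or.inl h)) (fun h => h1 (Or.inr h))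
                (fun h => h2 (Or.inl h)) (fun h => h2 (Or.inr h)) h4
            have hm1 : pvCount grid ((evaluate_land grid (i - 1) j (PySem.Set.add v (pvKey i j))).2 : PySem.Set String) < n :=
              lt_of_le_of_lt (pvCount_le grid _ _ (evaluate_land grid (i - 1) j (PySem.Set.add v (pvKey i j))).2.2) hm0
            have hm2 : pvCount grid ((evaluate_land grid (i + 1) j ((evaluate_land grid (i - 1) j (PySem.Set.add v (pvKey i j))).2 : PySem.Set String)).2 : PySem.Set String) < n :=
              lt_of_le_of_lt (pvCount_le grid _ _ (evaluate_land grid (i + 1) j _).2.2) hm1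
            have hm3 : pvCount grid ((evaluate_land grid i (j - 1) ((evaluate_land grid (i + 1) j ((evaluate_land grid (i - 1) j (PySem.Set.add v (pvKey i j))).2 : PySem.Set String)).2 : PySem.Set String)).2 : PySem.Set String) < n :=
              lt_of_le_of_lt (pvCount_le grid _ _ (evaluate_land grid i (j - 1) _).2.2) hm2
            have n1 := ih _ hm0 _ rfl (i - 1) j
            have n2 := ih _ hm1 _ rfl (i + 1) j
            have n3 := ih _ hm2 _ rfl i (j - 1)
            have n4 := ih _ hm3 _ rfl i (j + 1)
            simp only [Int.add_assoc]
            omega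

-- on an untouched land cell evaluate_land counts at least the cell itself
theorem eval_pos (grid : List (List String)) (v : PySem.Set String) (i j : Int)
    (h1 : ¬(i < 0 ∨ (grid.length : Int) ≤ i)) (h2 : ¬(j < 0 ∨ (grid.headI.length : Int) ≤ j))
    (h3 : ¬(PySem.List.pyGetD (PySem.List.pyGetD grid i []) j "" == "w") = true)
    (h4 : ¬PySem.Set.contains v (pvKey i j) = true) :
    0 < (evaluate_land grid i j v).1 := by
  rw [evaluate_land, dif_neg h1, dif_neg h2, dif_neg h3, dif_neg h4]
  have n1 := eval_nonneg grid _ (PySem.Set.add v (pvKey i j)) rfl (i - 1) j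
  have n2 := eval_nonneg grid _
    ((evaluate_land grid (i - 1) j (PySem.Set.add v (pvKey i j))).2 : PySem.Set String) rfl (i + 1) j
  have n3 := eval_nonneg grid _
    ((evaluate_land grid (i + 1) j ((evaluate_land grid (i - 1) j (PySem.Set.add v (pvKey i j))).2 : PySem.Set String)).2 : PySem.Set String) rfl i (j - 1)
  have n4 := eval_nonneg grid _
    ((evaluate_land grid i (j - 1) ((evaluate_land grid (i + 1) j ((evaluate_land grid (i - 1) j (PySem.Set.add v (pvKey i j))).2 : PySem.Set String)).2 : PySem.Set String)).2 : PySem.Set String) rfl i (j + 1)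
  simp only [Int.add_assoc]
  omega

-- on a water or already-visited cell evaluate_land is a no-op returning 0
theorem eval_skip (grid : List (List String)) (v : PySem.Set String) (i j : Int)
    (h1 : ¬(i < 0 ∨ (grid.length : Int) ≤ i)) (h2 : ¬(j < 0 ∨ (grid.headI.length : Int) ≤ j))
    (hg : (PySem.List.pyGetD (PySem.List.pyGetD grid i []) j "" == "w") = true
          ∨ PySem.Set.contains v (pvKey i j) = true) :
    (evaluate_land grid i j v).1 = 0 ∧ ((evaluate_land grid i j v).2 : PySem.Set String) = v := by
  rw [evaluate_land]
  by_cases h3 : (PySem.List.pyGetD (PySem.List.pyGetD grid i []) j "" == "w") = true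
  · rw [dif_neg h1, dif_neg h2, dif_pos h3]; exact ⟨rfl, rfl⟩
  · have h4 : PySem.Set.contains v (pvKey i j) = true := hg.resolve_left h3
    rw [dif_neg h1, dif_neg h2, dif_neg h3, dif_pos h4]; exact ⟨rfl, rfl⟩

-- one in-bounds cell of the row-major scan: A's step equals B's guarded flood-fill step
theorem step_eq (grid : List (List String)) (st : PySem.Set String × Int) (r c : Int)
    (h1 : ¬(r < 0 ∨ (grid.length : Int) ≤ r)) (h2 : ¬(c < 0 ∨ (grid.headI.length : Int) ≤ c)) :
    (let p := evaluate_land grid r c st.1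
     if p.1 ≤ st.2 ∧ 0 < p.1 then ((p.2 : PySem.Set String), p.1) else ((p.2 : PySem.Set String), st.2))
    = (if (PySem.List.pyGetD (PySem.List.pyGetD grid r []) c "" == "w")
          || PySem.Set.contains st.1 (pvKey r c) then st
       else
         let p := flood grid [(r, c)] st.1 0
         if 0 < p.1 ∧ p.1 < st.2 then (p.2, p.1) else (p.2, st.2)) := by
  by_cases hg1 : (PySem.List.pyGetD (PySem.List.pyGetD grid r []) c "" == "w") = true
  · have hz := eval_skip grid st.1 r c h1 h2 (Or.inl hg1)
    have hyb : ((PySem.List.pyGetD (PySem.List.pyGetD grid r []) c "" == "w")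
        || PySem.Set.contains st.1 (pvKey r c)) = true := by rw [hg1]; simp
    rw [if_pos hyb]
    simp only [hz.1, hz.2]
    simp
  · by_cases hg2 : PySem.Set.contains st.1 (pvKey r c) = true
    · have hz := eval_skip grid st.1 r c h1 h2 (Or.inr hg2)
      have hyb : ((PySem.List.pyGetD (PySem.List.pyGetD grid r []) c "" == "w")
          || PySem.Set.contains st.1 (pvKey r c)) = true := by rw [hg2]; simp
      rw [if_pos hyb]
      simp only [hz.1, hz.2]
      simp
    · have ha' : (PySem.List.pyGetD (PySem.List.pyGetD grid r []) c "" == "w") = false := by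
        simpa using hg1
      have hb' : PySem.Set.contains st.1 (pvKey r c) = false := by simpa using hg2
      have hnb : ¬(((PySem.List.pyGetD (PySem.List.pyGetD grid r []) c "" == "w")
          || PySem.Set.contains st.1 (pvKey r c)) = true) := by rw [ha', hb']; simp
      rw [if_neg hnb]
      have hf : flood grid [(r, c)] st.1 0
          = (0 + (evaluate_land grid r c st.1).1, ((evaluate_land grid r c st.1).2 : PySem.Set String)) := by
        rw [flood_eval grid _ _ rfl r c [] 0, flood]
      have hpos := eval_pos grid st.1 r c h1 h2 hg1 hg2
      simp only [hf, zero_add]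
      split_ifs <;> exact Prod.ext_iff.mpr ⟨rfl, by omega⟩

-- the two row-major scans compute the same final (visited, best) state
theorem fold_eq (grid : List (List String)) :
    ((PySem.List.pyRange 0 (grid.length : Int) 1).foldl (fun st r =>
      (PySem.List.pyRange 0 (grid.headI.length : Int) 1).foldl (fun st c =>
        let p := evaluate_land grid r c st.1
        if p.1 ≤ st.2 ∧ 0 < p.1 then (p.2.1, p.1) else (p.2.1, st.2)) st)
      (PySem.Set.empty, (10 : Int) ^ 1000))
    = ((PySem.List.pyRange 0 (grid.length : Int) 1).foldl (fun st r =>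
      (PySem.List.pyRange 0 (grid.headI.length : Int) 1).foldl (fun st c =>
        if (PySem.List.pyGetD (PySem.List.pyGetD grid r []) c "" == "w")
            || PySem.Set.contains st.1 (pvKey r c) then st
        else
          let p := flood grid [(r, c)] st.1 0
          if 0 < p.1 ∧ p.1 < st.2 then (p.2, p.1) else (p.2, st.2)) st)
      (PySem.Set.empty, (10 : Int) ^ 1000)) := by
  apply PySem.List.foldl_congr_mem
  intro acc r hr
  apply PySem.List.foldl_congr_mem
  intro acc2 c hc
  have hr' := PySem.List.mem_pyRange_one.mp hr
  have hc' := PySem.List.mem_pyRange_one.mp hc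
  exact step_eq grid acc2 r c (by omega) (by omega)

theorem smallest_land_spec : Claim_equal_smallest_land := by
  intro grid _ _
  simp only [Spec_smallest_land, smallest_land, smallest_land_alt]
  rw [fold_eq grid]
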